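-- pv_equiv track=rewrite | github.com/alvesag05/Lista | q37.py | ordena_vetor_misto
-- ===== SOURCE A (Python) =====
-- def ordena_vetor_misto(vetor):
--
--     for i in range(1, 6):
--         chave = vetor[i]
--         j = i - 1
--         while j >= 0 and vetor[j] > chave:
--             vetor[j + 1] = vetor[j]
--             j -= 1
--         vetor[j + 1] = chave
--
--     for i in range(7, 11):
--         chave = vetor[i]
--         j = i - 1
--         while j >= 6 and vetor[j] < chave:
--             vetor[j + 1] = vetor[j]
--             j -= 1
--         vetor[j + 1] = chave
--
--     return vetor
-- ===== SOURCE B (Python) =====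
-- def ordena_vetor_misto(vetor):
--     vetor[0:6] = sorted(vetor[i] for i in range(6))
--     vetor[6:11] = sorted((vetor[i] for i in range(6, 11)), reverse=True)
--     return vetor
-- ===== Notes on version B (the rewrite author's own statement) =====
-- stated objective: simpler
-- what changed: The two hand-written array insertion-sort loops (outer for plus a shifting while each) are replaced by two slice assignments using the library sorted(): ascending over positions 0-5 and descending over positions 6-10, indexing exactly the elements A reads.
import Mathlib
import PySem

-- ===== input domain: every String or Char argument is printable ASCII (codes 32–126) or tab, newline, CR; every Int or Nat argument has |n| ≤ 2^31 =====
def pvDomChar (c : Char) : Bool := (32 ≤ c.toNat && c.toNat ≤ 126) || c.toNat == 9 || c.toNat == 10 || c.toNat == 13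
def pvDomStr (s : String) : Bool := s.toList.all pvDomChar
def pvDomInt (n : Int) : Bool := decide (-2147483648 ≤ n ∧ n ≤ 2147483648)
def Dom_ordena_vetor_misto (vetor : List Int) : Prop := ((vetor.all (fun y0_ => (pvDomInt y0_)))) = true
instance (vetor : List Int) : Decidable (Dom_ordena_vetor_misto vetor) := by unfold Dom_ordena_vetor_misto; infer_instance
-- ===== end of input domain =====

-- B replaces A's two hand-written insertion-sort loops with two slice-based library sorts
-- (ascending on [0:6], descending on [6:11]); equal return value on Pre_ is what is proved.


-- ===== PORT A =====
-- inner 'while j >= 0 and vetor[j] > chave' loop of A's first (ascending) for-loop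
def insLoop1 (v : List Int) (chave : Int) (j : Int) : List Int :=
  if h : 0 ≤ j ∧ chave < PySem.List.pyGetD v j 0 then
    insLoop1 (PySem.List.pySetD v (j + 1) (PySem.List.pyGetD v j 0)) chave (j - 1)
  else
    PySem.List.pySetD v (j + 1) chave
termination_by (j + 1).toNat
decreasing_by omega

-- inner 'while j >= 6 and vetor[j] < chave' loop of A's second (descending) for-loop
def insLoop2 (v : List Int) (chave : Int) (j : Int) : List Int :=
  if h : 6 ≤ j ∧ PySem.List.pyGetD v j 0 < chave then
    insLoop2 (PySem.List.pySetD v (j + 1) (PySem.List.pyGetD v j 0)) chave (j - 1)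
  else
    PySem.List.pySetD v (j + 1) chave
termination_by (j - 5).toNat
decreasing_by omega

def ordena_vetor_misto (vetor : List Int) : List Int :=
  (PySem.List.pyRange 7 11 1).foldl
    (fun v i => insLoop2 v (PySem.List.pyGetD v i 0) (i - 1))
    ((PySem.List.pyRange 1 6 1).foldl
      (fun v i => insLoop1 v (PySem.List.pyGetD v i 0) (i - 1)) vetor)

-- ===== PORT B =====
-- second statement of B: vetor[6:11] = sorted((vetor[i] for i in range(6, 11)), reverse=True)
def pvSliceAssign2 (v1 : List Int) : List Int :=
  v1.take 6
    ++ PySem.List.sorted ((PySem.List.pyRange 6 11 1).map (fun i => PySem.List.pyGetD v1 i 0))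
         (fun x => x) true
    ++ v1.drop 11

def ordena_vetor_misto_alt (vetor : List Int) : List Int :=
  -- vetor[0:6] = sorted(vetor[i] for i in range(6))
  pvSliceAssign2
    (PySem.List.sorted ((PySem.List.pyRange 0 6 1).map (fun i => PySem.List.pyGetD vetor i 0))
       (fun x => x) false
      ++ vetor.drop 6)

-- ===== PRECONDITION & SPEC =====
-- Pre_ excludes exactly the vectors of length < 11, on which both A and B raise IndexError.
def Pre_ordena_vetor_misto (vetor : List Int) : Prop := 11 ≤ vetor.length
instance (vetor : List Int) : Decidable (Pre_ordena_vetor_misto vetor) := by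
  unfold Pre_ordena_vetor_misto; infer_instance

def pvWitness_ordena_vetor_misto : List Int := [5, 3, 9, 1, 3, 0, 2, 8, 4, 8, 6]

def Spec_ordena_vetor_misto (vetor : List Int) (out : List Int) : Prop :=
  out = ordena_vetor_misto_alt vetor
instance (vetor : List Int) (out : List Int) : Decidable (Spec_ordena_vetor_misto vetor out) := by
  unfold Spec_ordena_vetor_misto; infer_instance

-- ===== CLAIM (what is proved, stated in full; the proofs are below) =====
def Claim_equal_ordena_vetor_misto : Prop :=
  ∀ (vetor : List Int), Dom_ordena_vetor_misto vetor → Pre_ordena_vetor_misto vetor →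
    Spec_ordena_vetor_misto vetor (ordena_vetor_misto vetor)

-- ===== LEMMAS AND PROOFS =====

lemma getD_append_len (xs : List Int) (y : Int) (t : List Int) :
    (xs ++ y :: t).getD xs.length 0 = y := by simp [List.getD]

lemma set_append_len (xs : List Int) (y : Int) (t : List Int) (v : Int) :
    (xs ++ y :: t).set xs.length v = xs ++ v :: t := by
  induction xs with
  | nil => rfl
  | cons a xs ih => simp [ih]

lemma insertBy_append_singleton (before : Int → Int → Bool) (c a : Int) (s : List Int)
    (h : before c a = true) :
    PySem.List.insertBy before c (s ++ [a]) = PySem.List.insertBy before c s ++ [a] := by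
  induction s with
  | nil => simp [PySem.List.insertBy, h]
  | cons b s ih =>
    by_cases hb : before c b
    · simp [PySem.List.insertBy, hb]
    · simp [PySem.List.insertBy, hb, ih]

lemma ins1_eq (c : Int) : ∀ (s : List Int) (y : Int) (t : List Int),
    s.Pairwise (· ≤ ·) →
    insLoop1 (s ++ y :: t) c ((s.length : Int) - 1) =
      PySem.List.insertBy (fun a b => decide (a < b)) c s ++ t := by
  intro s
  induction s using List.reverseRecOn with
  | nil =>
    intro y t _
    rw [insLoop1]
    simp [PySem.List.insertBy, PySem.List.pySetD_of_nonneg]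
  | append_singleton s' a ih =>
    intro y t hp
    have hlen : ((s' ++ [a]).length : Int) - 1 = (s'.length : Int) := by simp
    rw [insLoop1, hlen]
    have hget : PySem.List.pyGetD (s' ++ [a] ++ y :: t) (s'.length : Int) 0 = a := by
      rw [PySem.List.pyGetD_natCast]
      have : s' ++ [a] ++ y :: t = s' ++ a :: (y :: t) := by simp
      rw [this, getD_append_len]
    by_cases hc : c < a
    · have hcond : (0 ≤ (s'.length : Int) ∧ c < PySem.List.pyGetD (s' ++ [a] ++ y :: t) (s'.length : Int) 0) := by
        constructor
        · positivity
        · rw [hget]; exact hc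
      rw [dif_pos hcond]
      have hset : PySem.List.pySetD (s' ++ [a] ++ y :: t) ((s'.length : Int) + 1)
          (PySem.List.pyGetD (s' ++ [a] ++ y :: t) (s'.length : Int) 0) = s' ++ a :: (a :: t) := by
        rw [hget]
        have h1 : ((s'.length : Int) + 1) = (((s' ++ [a]).length : Nat) : Int) := by simp
        rw [h1, PySem.List.pySetD_natCast]
        have : s' ++ [a] ++ y :: t = (s' ++ [a]) ++ y :: t := by simp
        rw [this, set_append_len]
        simp
      rw [hset]
      have ih' := ih a (a :: t) (hp.sublist (by simp))
      rw [ih']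
      rw [insertBy_append_singleton _ _ _ _ (by simp [hc])]
      simp
    · have hcond : ¬ (0 ≤ (s'.length : Int) ∧ c < PySem.List.pyGetD (s' ++ [a] ++ y :: t) (s'.length : Int) 0) := by
        rw [hget]; tauto
      rw [dif_neg hcond]
      have h1 : ((s'.length : Int) + 1) = (((s' ++ [a]).length : Nat) : Int) := by simp
      rw [h1, PySem.List.pySetD_natCast]
      have h2 : s' ++ [a] ++ y :: t = (s' ++ [a]) ++ y :: t := by simp
      rw [h2, set_append_len]
      rw [PySem.List.insertBy_of_forall_not_before]
      · simp
      · intro x hx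
        simp at hx ⊢
        rcases hx with hx | hx
        · have : x ≤ a := by
            have := List.pairwise_append.mp (by simpa using hp)
            exact (this.2.2 x hx a (by simp))
          omega
        · omega

lemma ins2_eq (c : Int) : ∀ (s : List Int) (p : List Int) (y : Int) (t : List Int), p.length = 6 →
    s.Pairwise (fun a b => b ≤ a) →
    insLoop2 (p ++ (s ++ y :: t)) c ((6 : Int) + (s.length : Int) - 1) =
      p ++ (PySem.List.insertBy (fun a b => decide (b < a)) c s ++ t) := by
  intro s
  induction s using List.reverseRecOn with
  | nil =>
    intro p y t hp6 _
    rw [insLoop2]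
    rw [dif_neg (by rintro ⟨h6, -⟩; norm_num at h6)]
    simp only [List.length_nil, Int.natCast_zero] at *
    rw [show (6:Int) + 0 - 1 + 1 = ((p.length : Nat):Int) by simp [hp6]]
    rw [PySem.List.pySetD_natCast]
    simp only [List.nil_append]
    rw [set_append_len]
    simp [PySem.List.insertBy]
  | append_singleton s' a ih =>
    intro p y t hp6 hp
    have hlen : (6 : Int) + (((s' ++ [a]).length : Nat) : Int) - 1 = ((p.length + s'.length : Nat) : Int) := by
      simp [hp6]; omega
    rw [insLoop2, hlen]
    have hsplit : p ++ (s' ++ [a] ++ y :: t) = (p ++ s') ++ a :: (y :: t) := by simp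
    have hget : PySem.List.pyGetD (p ++ (s' ++ [a] ++ y :: t)) ((p.length + s'.length : Nat) : Int) 0 = a := by
      rw [PySem.List.pyGetD_natCast, hsplit]
      rw [show p.length + s'.length = (p ++ s').length by simp]
      rw [getD_append_len]
    by_cases hc : a < c
    · rw [dif_pos ⟨by omega, by rw [hget]; exact hc⟩]
      have hset : PySem.List.pySetD (p ++ (s' ++ [a] ++ y :: t)) (((p.length + s'.length : Nat) : Int) + 1)
          (PySem.List.pyGetD (p ++ (s' ++ [a] ++ y :: t)) ((p.length + s'.length : Nat) : Int) 0)
          = p ++ (s' ++ a :: (a :: t)) := by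
        rw [hget]
        rw [show (((p.length + s'.length : Nat) : Int) + 1) = ((((p ++ s') ++ [a]).length : Nat) : Int) by (simp; try omega)]
        rw [PySem.List.pySetD_natCast]
        rw [show p ++ (s' ++ [a] ++ y :: t) = ((p ++ s') ++ [a]) ++ y :: t by simp]
        rw [set_append_len]
        simp
      rw [hset]
      have harg : ((p.length + s'.length : Nat) : Int) - 1 = (6 : Int) + (s'.length : Int) - 1 := by
        simp [hp6]
      rw [harg]
      have ih' := ih p a (a :: t) hp6 (hp.sublist (by simp))
      rw [ih']
      rw [insertBy_append_singleton _ _ _ _ (by simp [hc])]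
      simp
    · rw [dif_neg (by rw [hget]; tauto)]
      rw [show (((p.length + s'.length : Nat) : Int) + 1) = (((p ++ (s' ++ [a])).length : Nat) : Int) by (simp; try omega)]
      rw [show p ++ (s' ++ [a] ++ y :: t) = (p ++ (s' ++ [a])) ++ y :: t by simp]
      rw [PySem.List.pySetD_natCast, set_append_len]
      rw [PySem.List.insertBy_of_forall_not_before]
      · simp
      · intro x hx
        simp at hx ⊢
        rcases hx with hx | hx
        · have : a ≤ x := by
            have := List.pairwise_append.mp (by simpa using hp)
            exact (this.2.2 x hx a (by simp))
          omega
        · omega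

-- loop invariants: state of the vector after the ascending / descending phase has
-- processed the prefix up to index i
def pvS (v : List Int) (i : Nat) : List Int :=
  PySem.List.sorted (v.take i) (fun x => x) false ++ v.drop i

def pvT (w : List Int) (i : Nat) : List Int :=
  w.take 6 ++ PySem.List.sorted ((w.drop 6).take (i - 6)) (fun x => x) true ++ w.drop i

lemma stepAsc (v : List Int) (hlen : 11 ≤ v.length) (i : Nat) (h1 : 1 ≤ i) (h5 : i ≤ 5) :
    insLoop1 (pvS v i) (PySem.List.pyGetD (pvS v i) (i : Int) 0) ((i : Int) - 1) = pvS v (i + 1) := by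
  have hi : i < v.length := by omega
  have hs : (PySem.List.sorted (v.take i) (fun x => x) false).length = i := by
    rw [PySem.List.length_sorted]; simp; omega
  have hdrop : v.drop i = v[i] :: v.drop (i + 1) := List.drop_eq_getElem_cons hi
  unfold pvS
  rw [hdrop]
  have hcast : ((i : Nat) : Int) = ((PySem.List.sorted (v.take i) (fun x => x) false).length : Int) := by
    rw [hs]
  rw [hcast, PySem.List.pyGetD_natCast, getD_append_len]
  rw [ins1_eq _ _ _ _ (by simpa using PySem.List.sorted_pairwise (v.take i) (fun x => x))]
  congr 1
  have ht : v.take (i + 1) = v.take i ++ [v[i]] := by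
    rw [List.take_add_one]
    simp [hi]
  rw [PySem.List.sorted_eq_foldl_insertBy, PySem.List.sorted_eq_foldl_insertBy, ht,
    List.foldl_append]
  simp

lemma stepDesc (w : List Int) (hlen : 11 ≤ w.length) (i : Nat) (h1 : 7 ≤ i) (h5 : i ≤ 10) :
    insLoop2 (pvT w i) (PySem.List.pyGetD (pvT w i) (i : Int) 0) ((i : Int) - 1) = pvT w (i + 1) := by
  have hi : i < w.length := by omega
  have hp6 : (w.take 6).length = 6 := by simp; omega
  have hs : (PySem.List.sorted ((w.drop 6).take (i - 6)) (fun x => x) true).length = i - 6 := by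
    rw [PySem.List.length_sorted]; simp; omega
  have hdrop : w.drop i = w[i] :: w.drop (i + 1) := List.drop_eq_getElem_cons hi
  unfold pvT
  rw [hdrop]
  have hassoc : w.take 6 ++ PySem.List.sorted ((w.drop 6).take (i - 6)) (fun x => x) true
      ++ w[i] :: w.drop (i + 1)
      = (w.take 6 ++ PySem.List.sorted ((w.drop 6).take (i - 6)) (fun x => x) true)
        ++ w[i] :: w.drop (i + 1) := by simp
  have hget : PySem.List.pyGetD (w.take 6 ++ PySem.List.sorted ((w.drop 6).take (i - 6)) (fun x => x) true
      ++ w[i] :: w.drop (i + 1)) (i : Int) 0 = w[i] := by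
    rw [show ((i : Nat) : Int) = (((w.take 6 ++ PySem.List.sorted ((w.drop 6).take (i - 6)) (fun x => x) true).length : Nat) : Int) by
      simp [hs]; omega]
    rw [PySem.List.pyGetD_natCast, hassoc, getD_append_len]
  rw [hget]
  have harg : ((i : Nat) : Int) - 1 = (6 : Int) + ((PySem.List.sorted ((w.drop 6).take (i - 6)) (fun x => x) true).length : Int) - 1 := by
    rw [hs]; omega
  rw [harg]
  rw [show w.take 6 ++ PySem.List.sorted ((w.drop 6).take (i - 6)) (fun x => x) true ++ w[i] :: w.drop (i + 1)
      = w.take 6 ++ (PySem.List.sorted ((w.drop 6).take (i - 6)) (fun x => x) true ++ w[i] :: w.drop (i + 1)) by simp]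
  rw [ins2_eq _ _ _ _ _ hp6 (by simpa using PySem.List.sorted_pairwise_rev ((w.drop 6).take (i - 6)) (fun x => x))]
  simp only [List.append_assoc]
  congr 2
  have ht : (w.drop 6).take (i + 1 - 6) = (w.drop 6).take (i - 6) ++ [w[i]] := by
    rw [show i + 1 - 6 = (i - 6) + 1 by omega, List.take_add_one]
    have : (w.drop 6)[i - 6]? = some w[i] := by
      rw [List.getElem?_drop]
      rw [show 6 + (i - 6) = i by omega]
      exact List.getElem?_eq_getElem hi
    simp [this]
  rw [ht, PySem.List.sorted_rev_eq_foldl_insertBy, PySem.List.sorted_rev_eq_foldl_insertBy,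
    List.foldl_append]
  simp

lemma pvS_one (v : List Int) (h : 1 ≤ v.length) : pvS v 1 = v := by
  obtain ⟨a, t, rfl⟩ : ∃ a t, v = a :: t := by
    cases v with
    | nil => simp at h
    | cons a t => exact ⟨a, t, rfl⟩
  unfold pvS
  rfl

lemma pvT_seven (w : List Int) (h : 7 ≤ w.length) : pvT w 7 = w := by
  have h6 : 6 < w.length := by omega
  unfold pvT
  have hd : w.drop 6 = w[6] :: w.drop 7 := List.drop_eq_getElem_cons h6
  rw [hd]
  show w.take 6 ++ PySem.List.sorted [w[6]] (fun x => x) true ++ w.drop 7 = w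
  rw [show PySem.List.sorted [w[6]] (fun x => x) true = [w[6]] from rfl]
  rw [show w.take 6 ++ [w[6]] ++ w.drop 7 = w.take 6 ++ (w[6] :: w.drop 7) by simp]
  rw [← hd]
  exact List.take_append_drop 6 w

lemma phase1_eq (v : List Int) (hlen : 11 ≤ v.length) :
    (PySem.List.pyRange 1 6 1).foldl
      (fun w i => insLoop1 w (PySem.List.pyGetD w i 0) (i - 1)) v = pvS v 6 := by
  have hr : PySem.List.pyRange 1 6 1 = [1, 2, 3, 4, 5] := by decide
  rw [hr]
  simp only [List.foldl_cons, List.foldl_nil]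
  have s1 := stepAsc v hlen 1 (by omega) (by omega)
  have s2 := stepAsc v hlen 2 (by omega) (by omega)
  have s3 := stepAsc v hlen 3 (by omega) (by omega)
  have s4 := stepAsc v hlen 4 (by omega) (by omega)
  have s5 := stepAsc v hlen 5 (by omega) (by omega)
  simp only [Nat.cast_one, Nat.cast_ofNat] at s1 s2 s3 s4 s5
  conv_lhs => rw [← pvS_one v (by omega)]
  rw [s1, s2, s3, s4, s5]

lemma phase2_eq (w : List Int) (hlen : 11 ≤ w.length) :
    (PySem.List.pyRange 7 11 1).foldl
      (fun u i => insLoop2 u (PySem.List.pyGetD u i 0) (i - 1)) w = pvT w 11 := by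
  have hr : PySem.List.pyRange 7 11 1 = [7, 8, 9, 10] := by decide
  rw [hr]
  simp only [List.foldl_cons, List.foldl_nil]
  have s7 := stepDesc w hlen 7 (by omega) (by omega)
  have s8 := stepDesc w hlen 8 (by omega) (by omega)
  have s9 := stepDesc w hlen 9 (by omega) (by omega)
  have s10 := stepDesc w hlen 10 (by omega) (by omega)
  simp only [Nat.cast_ofNat] at s7 s8 s9 s10
  conv_lhs => rw [← pvT_seven w (by omega)]
  rw [s7, s8, s9, s10]

lemma map_pyGetD_first_six (v : List Int) (h : 11 ≤ v.length) :
    (PySem.List.pyRange 0 6 1).map (fun i => PySem.List.pyGetD v i 0) = v.take 6 := by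
  rw [show PySem.List.pyRange 0 6 1 = [0,1,2,3,4,5] by decide]
  simp only [List.map_cons, List.map_nil]
  have g : ∀ (k : Nat), PySem.List.pyGetD v (k : Int) 0 = v.getD k 0 :=
    fun k => PySem.List.pyGetD_natCast v k 0
  have g0 := g 0; have g1 := g 1; have g2 := g 2; have g3 := g 3; have g4 := g 4; have g5 := g 5
  norm_num at g0 g1 g2 g3 g4 g5
  rw [g0, g1, g2, g3, g4, g5]
  apply List.ext_getElem
  · simp; omega
  · intro i h1 h2
    simp only [List.length_cons, List.length_nil] at h1
    interval_cases i <;> simp [List.getElem_take] <;> exact List.getD_eq_getElem _ _ (by omega)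

lemma map_pyGetD_six_to_eleven (v : List Int) (h : 11 ≤ v.length) :
    (PySem.List.pyRange 6 11 1).map (fun i => PySem.List.pyGetD v i 0) = (v.drop 6).take 5 := by
  rw [show PySem.List.pyRange 6 11 1 = [6,7,8,9,10] by decide]
  simp only [List.map_cons, List.map_nil]
  have g : ∀ (k : Nat), PySem.List.pyGetD v (k : Int) 0 = v.getD k 0 :=
    fun k => PySem.List.pyGetD_natCast v k 0
  have g6 := g 6; have g7 := g 7; have g8 := g 8; have g9 := g 9; have g10 := g 10
  norm_num at g6 g7 g8 g9 g10
  rw [g6, g7, g8, g9, g10]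
  apply List.ext_getElem
  · simp; omega
  · intro i h1 h2
    simp only [List.length_cons, List.length_nil] at h1
    interval_cases i <;> simp [List.getElem_take] <;> exact List.getD_eq_getElem _ _ (by omega)

lemma length_pvS_six (v : List Int) : (pvS v 6).length = v.length := by
  unfold pvS
  rw [List.length_append, PySem.List.length_sorted]
  simp
  omega

-- ===== VERDICT (by name: the statement is the Claim_ definition above) =====
theorem ordena_vetor_misto_spec : Claim_equal_ordena_vetor_misto := by
  intro v _ hpre
  unfold Pre_ordena_vetor_misto at hpre
  unfold Spec_ordena_vetor_misto
  have hA : ordena_vetor_misto v = pvT (pvS v 6) 11 := by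
    unfold ordena_vetor_misto
    rw [phase1_eq v hpre]
    exact phase2_eq (pvS v 6) (by rw [length_pvS_six]; exact hpre)
  have hwlen : 11 ≤ (pvS v 6).length := by rw [length_pvS_six]; exact hpre
  have hB : ordena_vetor_misto_alt v = pvT (pvS v 6) 11 := by
    unfold ordena_vetor_misto_alt pvSliceAssign2
    rw [map_pyGetD_first_six v hpre]
    rw [show PySem.List.sorted (v.take 6) (fun x => x) false ++ v.drop 6 = pvS v 6 from rfl]
    rw [map_pyGetD_six_to_eleven (pvS v 6) hwlen]
    unfold pvT
    norm_num
  rw [hA, hB]
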